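-- pv_equiv track=rewrite | github.com/tushcmd/dsa-tests | .history/calcResult_20240720043530.py | calcResult
-- ===== SOURCE A (Python) =====
-- def calcResult(cards):
--     # Separate numeric cards and check for '10x'
--     numeric_cards = [int(card) for card in cards if card.isdigit()]
--     has_multiplier = '10x' in cards
--
--     if numeric_cards:
--         # Find the number closest to 10
--         closest_to_10 = min(numeric_cards, key=lambda x: abs(10 - x))
--
--         # Remove the closest number to 10 (equivalent to replacing it with 0)
--         numeric_cards.remove(closest_to_10)
--
--     # Sum the remaining numbers
--     total = sum(numeric_cards)
--
--     # Apply multiplier if '10x' is present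
--     if has_multiplier:
--         total *= 10
--
--     return total
-- ===== SOURCE B (Python) =====
-- def calcResult(cards):
--     # One pass: running total of numeric cards plus a running (distance, value)
--     # of the card closest to 10 (strict '<' keeps the first occurrence, matching
--     # Python's min tie-breaking); subtract the closest value at the end.
--     total = 0
--     best = None  # (distance to 10, value) of the closest-so-far numeric card
--     for card in cards:
--         if card.isdigit():
--             v = int(card)
--             total += v
--             d = abs(10 - v)
--             if best is None or d < best[0]:
--                 best = (d, v)
--     if best is not None:
--         total -= best[1]
--     if '10x' in cards:
--         total *= 10
--     return total
-- ===== Notes on version B (the rewrite author's own statement) =====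
-- stated objective: alternative
-- what changed: Replaced A's filter/min-with-key/list.remove/sum chain over an intermediate list with a single accumulator pass keeping a running total and the (distance, value) of the card closest to 10, subtracting that value at the end.
import Mathlib
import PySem

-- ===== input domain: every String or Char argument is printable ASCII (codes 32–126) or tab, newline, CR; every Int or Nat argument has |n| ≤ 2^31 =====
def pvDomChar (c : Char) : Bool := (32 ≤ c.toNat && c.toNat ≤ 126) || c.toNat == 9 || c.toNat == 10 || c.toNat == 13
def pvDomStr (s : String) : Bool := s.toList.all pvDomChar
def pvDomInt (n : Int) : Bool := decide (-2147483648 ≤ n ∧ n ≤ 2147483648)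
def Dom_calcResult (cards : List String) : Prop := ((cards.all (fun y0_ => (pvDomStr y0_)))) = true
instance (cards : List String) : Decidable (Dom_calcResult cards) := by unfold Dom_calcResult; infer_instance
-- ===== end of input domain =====

-- B replaces A's filter/min/remove/sum chain with a single accumulator pass (same O(n) cost; objective: alternative decomposition).


-- ===== PORT A =====
-- int(card) for a card with card.isdigit(): ofStr? always succeeds there; getD 0 is never the default on such cards
def pvParse (c : String) : Int := (PySem.Int.ofStr? c).getD 0

def calcResult (cards : List String) : Int :=
  let numericCards := (cards.filter (fun c => PySem.Str.strIsdigit c)).map pvParse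
  let hasMultiplier := cards.contains "10x"
  let numericCards' :=
    if numericCards ≠ [] then
      match PySem.List.min? numericCards (fun x => |10 - x|) with
      | some closestTo10 => (PySem.List.remove? numericCards closestTo10).getD numericCards
      | none => numericCards
    else numericCards
  let total := numericCards'.sum
  if hasMultiplier then total * 10 else total

-- ===== PORT B =====
def calcResult_alt (cards : List String) : Int :=
  let st := cards.foldl
    (fun (st : Int × Option (Int × Int)) card =>
      if PySem.Str.strIsdigit card then
        let v := pvParse card
        let d := |10 - v|
        let best :=
          match st.2 with
          | none => some (d, v)
          | some (bd, bv) => if d < bd then some (d, v) else some (bd, bv)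
        (st.1 + v, best)
      else st) ((0 : Int), (none : Option (Int × Int)))
  let total :=
    match st.2 with
    | some (_, bv) => st.1 - bv
    | none => st.1
  if cards.contains "10x" then total * 10 else total

-- ===== PRECONDITION & SPEC =====
def Spec_calcResult (cards : List String) (out : Int) : Prop := out = calcResult_alt cards
instance (cards : List String) (out : Int) : Decidable (Spec_calcResult cards out) := by unfold Spec_calcResult; infer_instance

-- ===== CLAIM (what is proved, stated in full; the proofs are below) =====
def Claim_equal_calcResult : Prop := ∀ (cards : List String), Dom_calcResult cards → Spec_calcResult cards (calcResult cards)

-- ===== LEMMAS AND PROOFS =====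

-- B's fold step and the minimum-tracking step of PySem.List.min?, named for the lemmas
def pvStep (st : Int × Option (Int × Int)) (card : String) : Int × Option (Int × Int) :=
  if PySem.Str.strIsdigit card then
    let v := pvParse card
    let d := |10 - v|
    let best :=
      match st.2 with
      | none => some (d, v)
      | some (bd, bv) => if d < bd then some (d, v) else some (bd, bv)
    (st.1 + v, best)
  else st

def pvBStep (b : Option (Int × Int)) (v : Int) : Option (Int × Int) :=
  match b with
  | none => some (|10 - v|, v)
  | some (bd, bv) => if |10 - v| < bd then some (|10 - v|, v) else some (bd, bv)

def pvMStep (acc : Option Int) (x : Int) : Option Int :=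
  match acc with
  | none => some x
  | some m => if |10 - x| < |10 - m| then some x else some m

def pvLift (m : Option Int) : Option (Int × Int) :=
  match m with
  | none => none
  | some v => some (|10 - v|, v)

theorem pvFold_split (cards : List String) (t0 : Int) (b0 : Option (Int × Int)) :
    cards.foldl pvStep (t0, b0) =
      (t0 + ((cards.filter (fun c => PySem.Str.strIsdigit c)).map pvParse).sum,
       ((cards.filter (fun c => PySem.Str.strIsdigit c)).map pvParse).foldl pvBStep b0) := by
  induction cards generalizing t0 b0 with
  | nil => simp
  | cons c cs ih =>
    by_cases h : PySem.Chars.strIsdigit c.toList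
    · simp only [List.foldl_cons, pvStep, PySem.Str.strIsdigit, h, if_true, ih]
      simp [h, pvBStep]
      ring_nf
    · simp [List.foldl_cons, pvStep, PySem.Str.strIsdigit, h, ih]

theorem pvBStep_lift_one (acc : Option Int) (v : Int) :
    pvBStep (pvLift acc) v = pvLift (pvMStep acc v) := by
  cases acc with
  | none => rfl
  | some m =>
    by_cases h : |10 - v| < |10 - m| <;> simp [pvBStep, pvMStep, pvLift, h]

theorem pvBStep_lift (nums : List Int) (acc : Option Int) :
    nums.foldl pvBStep (pvLift acc) = pvLift (nums.foldl pvMStep acc) := by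
  induction nums generalizing acc with
  | nil => rfl
  | cons v vs ih =>
    rw [List.foldl_cons, List.foldl_cons, pvBStep_lift_one]
    exact ih _

theorem pvMin_eq (nums : List Int) :
    PySem.List.min? nums (fun x => |10 - x|) = nums.foldl pvMStep none := by
  unfold PySem.List.min?
  congr 1
  funext acc x
  cases acc <;> rfl

theorem pvSum_erase (nums : List Int) (m : Int) (hm : m ∈ nums) :
    (nums.erase m).sum = nums.sum - m := by
  have := List.sum_erase hm
  omega

theorem calcResult_eq (cards : List String) : calcResult cards = calcResult_alt cards := by
  unfold calcResult calcResult_alt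
  have hst : cards.foldl
      (fun (st : Int × Option (Int × Int)) card =>
        if PySem.Str.strIsdigit card then
          let v := pvParse card
          let d := |10 - v|
          let best :=
            match st.2 with
            | none => some (d, v)
            | some (bd, bv) => if d < bd then some (d, v) else some (bd, bv)
          (st.1 + v, best)
        else st) ((0 : Int), (none : Option (Int × Int)))
      = cards.foldl pvStep ((0 : Int), (none : Option (Int × Int))) := rfl
  rw [hst, pvFold_split]
  set nums := (cards.filter (fun c => PySem.Str.strIsdigit c)).map pvParse with hnums
  have hb : nums.foldl pvBStep none = pvLift (nums.foldl pvMStep none) :=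
    pvBStep_lift nums none
  rw [hb]
  cases hmin : nums.foldl pvMStep none with
  | none =>
    have hnil : nums = [] := by
      have h0 : PySem.List.min? nums (fun x => |10 - x|) = none := by
        rw [pvMin_eq, hmin]
      exact (PySem.List.min?_eq_none_iff _ _).mp h0
    simp [hnil, pvLift]
  | some m =>
    have hminq : PySem.List.min? nums (fun x => |10 - x|) = some m := by
      rw [pvMin_eq, hmin]
    have hmem : m ∈ nums := PySem.List.min?_mem hminq
    have hne : nums ≠ [] := by
      intro h0
      rw [h0] at hmem
      simp at hmem
    have hrem : PySem.List.remove? nums m = some (nums.erase m) :=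
      PySem.List.remove?_eq_some_erase nums m hmem
    simp only [hne, if_true, ne_eq, not_false_iff, hminq, hrem, Option.getD_some, pvLift]
    rw [pvSum_erase nums m hmem]
    split <;> ring

-- ===== VERDICT (by name: the statement is the Claim_ definition above) =====
theorem calcResult_spec : Claim_equal_calcResult := by
  intro cards _
  exact calcResult_eq cards
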